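-- pv_equiv track=rewrite | github.com/MC-and-his-Agents/Syvert | syvert/platform_leakage.py | _resolve_path_aliases
-- ===== SOURCE A (Python) =====
-- from collections.abc import Iterable, Mapping, Sequence
--
-- def _resolve_path_aliases(
--     events: Sequence[tuple[tuple[int, int], frozenset[str], bool]],
--     position: tuple[int, int],
-- ) -> frozenset[str]:
--     active_values: set[str] = set()
--     for event_position, value, branch_local in events:
--         if event_position >= position:
--             break
--         if branch_local:
--             active_values.update(value)
--             continue
--         active_values = set(value)
--     return frozenset(active_values)
-- ===== SOURCE B (Python) =====
-- def _resolve_path_aliases(events, position):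
--     # Find the cutoff: index of the first event at or past `position`
--     # (preserving the original break semantics on unsorted input).
--     cutoff = len(events)
--     for i, ev in enumerate(events):
--         if ev[0] >= position:
--             cutoff = i
--             break
--     prefix = events[:cutoff]
--     # Scan the prefix backwards: collect branch-local values until the
--     # last non-branch-local event (the base), which resets everything before it.
--     base = None
--     tail = []
--     for ev in reversed(prefix):
--         if ev[2]:
--             tail.append(ev[1])
--         else:
--             base = ev[1]
--             break
--     result = set() if base is None else set(base)
--     for v in reversed(tail):
--         result |= v
--     return frozenset(result)
-- ===== Notes on version B (the rewrite author's own statement) =====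
-- stated objective: alternative
-- what changed: Instead of folding every prefix event into a mutable set that non-branch-local events reset, B locates the cutoff index, scans the prefix backwards to find the base (last non-branch-local event) and the branch-local values after it, and unions only those; events before the base are never touched.
import Mathlib
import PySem

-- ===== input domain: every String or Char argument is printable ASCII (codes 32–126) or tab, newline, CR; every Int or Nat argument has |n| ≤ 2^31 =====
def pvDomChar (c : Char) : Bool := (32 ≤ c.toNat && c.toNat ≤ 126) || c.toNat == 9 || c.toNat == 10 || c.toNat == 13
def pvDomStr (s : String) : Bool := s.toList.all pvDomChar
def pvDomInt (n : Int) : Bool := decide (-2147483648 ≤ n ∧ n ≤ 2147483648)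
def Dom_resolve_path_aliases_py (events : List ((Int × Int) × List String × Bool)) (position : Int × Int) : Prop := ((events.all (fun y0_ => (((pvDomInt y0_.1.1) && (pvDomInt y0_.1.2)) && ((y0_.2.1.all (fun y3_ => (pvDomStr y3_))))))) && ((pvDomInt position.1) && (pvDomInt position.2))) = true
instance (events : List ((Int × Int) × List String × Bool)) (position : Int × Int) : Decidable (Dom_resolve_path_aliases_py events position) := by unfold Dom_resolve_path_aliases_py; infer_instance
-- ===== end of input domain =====

-- B replaces A's forward fold (a set that non-branch-local events reset) by a cutoff search
-- plus a backward scan that finds the base event and the branch-local values after it (alternative decomposition).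


-- ===== PORT A =====
-- Python tuple comparison a >= b on (int, int): lexicographic
def pvTupGe (a b : Int × Int) : Bool := a.1 > b.1 || (a.1 == b.1 && a.2 ≥ b.2)

-- the for-loop of A: break on event_position >= position, update on branch_local, else reset
def pvAGo (position : Int × Int) :
    List ((Int × Int) × List String × Bool) → PySem.Set String → PySem.Set String
  | [], acc => acc
  | (p, v, bl) :: rest, acc =>
    if pvTupGe p position then acc
    else if bl then pvAGo position rest (PySem.Set.update acc v)
    else pvAGo position rest (PySem.Set.ofList v)

def resolve_path_aliases_py (events : List ((Int × Int) × List String × Bool)) (position : Int × Int) : List String :=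
  pvAGo position events PySem.Set.empty

-- ===== PORT B =====
-- cutoff = index of first event with position >= `position`, else len(events)
def pvBCut (position : Int × Int) : List ((Int × Int) × List String × Bool) → Nat
  | [] => 0
  | e :: rest => if pvTupGe e.1 position then 0 else pvBCut position rest + 1

-- the `for ev in reversed(prefix)` loop: (base, tail) — tail in append (= processed) order
def pvBRevScan : List ((Int × Int) × List String × Bool) → Option (List String) × List (List String)
  | [] => (none, [])
  | (_, v, bl) :: rest =>
    if bl then (let r := pvBRevScan rest; (r.1, v :: r.2))
    else (some v, [])

def resolve_path_aliases_py_alt (events : List ((Int × Int) × List String × Bool)) (position : Int × Int) : List String :=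
  let cutoff := pvBCut position events
  let pre := events.take cutoff      -- events[:cutoff] with 0 ≤ cutoff ≤ len
  let s := pvBRevScan pre.reverse
  let base : PySem.Set String := match s.1 with
    | none => PySem.Set.empty
    | some b => PySem.Set.ofList b
  s.2.reverse.foldl (fun r v => PySem.Set.union r v) base

-- ===== PRECONDITION & SPEC =====
def Spec_resolve_path_aliases_py (events : List ((Int × Int) × List String × Bool)) (position : Int × Int) (out : List String) : Prop := out = resolve_path_aliases_py_alt events position
instance (events : List ((Int × Int) × List String × Bool)) (position : Int × Int) (out : List String) : Decidable (Spec_resolve_path_aliases_py events position out) := by unfold Spec_resolve_path_aliases_py; infer_instance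

-- ===== CLAIM (what is proved, stated in full; the proofs are below) =====
def Claim_equal_resolve_path_aliases_py : Prop := ∀ (events : List ((Int × Int) × List String × Bool)) (position : Int × Int), Dom_resolve_path_aliases_py events position → Spec_resolve_path_aliases_py events position (resolve_path_aliases_py events position)

-- ===== LEMMAS AND PROOFS =====
-- the body of A's loop, as a fold step
def pvStep (acc : PySem.Set String) (e : (Int × Int) × List String × Bool) : PySem.Set String :=
  if e.2.2 then PySem.Set.update acc e.2.1 else PySem.Set.ofList e.2.1

-- A's break-loop processes exactly the prefix up to B's cutoff
theorem pvAGo_eq_foldl_take (position : Int × Int)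
    (l : List ((Int × Int) × List String × Bool)) (acc : PySem.Set String) :
    pvAGo position l acc = (l.take (pvBCut position l)).foldl pvStep acc := by
  induction l generalizing acc with
  | nil => rfl
  | cons e rest ih =>
    obtain ⟨p, v, bl⟩ := e
    by_cases h : pvTupGe p position = true
    · simp [pvAGo, pvBCut, h]
    · by_cases hb : bl = true <;>
        simp [pvAGo, pvBCut, h, hb, ih, pvStep]

-- folding A's step over any list equals B's backward decomposition of that list
theorem pvFoldl_eq_revScan (l : List ((Int × Int) × List String × Bool)) (acc : PySem.Set String) :
    l.foldl pvStep acc =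
      (pvBRevScan l.reverse).2.reverse.foldl (fun r v => PySem.Set.union r v)
        (match (pvBRevScan l.reverse).1 with
          | none => acc
          | some b => PySem.Set.ofList b) := by
  induction l using List.reverseRecOn generalizing acc with
  | nil => rfl
  | append_singleton m e ih =>
    obtain ⟨p, v, bl⟩ := e
    rw [List.foldl_append]
    simp only [List.foldl_cons, List.foldl_nil, List.reverse_append, List.reverse_singleton,
      List.singleton_append, pvBRevScan]
    have hu : ∀ (s : PySem.Set String) (t : List String),
        PySem.Set.union s t = PySem.Set.update s t := fun _ _ => rfl
    by_cases hb : bl = true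
    · simp [hb, pvStep, ih, hu]
    · simp [hb, pvStep]

-- ===== VERDICT (by name: the statement is the Claim_ definition above) =====
theorem resolve_path_aliases_py_spec : Claim_equal_resolve_path_aliases_py := by
  intro events position _
  show resolve_path_aliases_py events position = resolve_path_aliases_py_alt events position
  simp only [resolve_path_aliases_py, resolve_path_aliases_py_alt]
  rw [pvAGo_eq_foldl_take, pvFoldl_eq_revScan]
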